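-- pv_equiv track=rewrite | github.com/mb-git-321/larbsa | automate/maze.py | doubleValues
-- ===== SOURCE A (Python) =====
-- def doubleValues (connections, size):
--     doubledBlockers = {}
--     for a in range(len(connections)):
--         val = connections[a]
--         for b in range(len(val)):
--             newTup = (connections[a][b][0] * 2, connections[a][b][1] * 2)
--             doubledBlockers[newTup] = None
--     blockers = {}
--     for i in range(size):
--         for j in range(size):
--             if (i, j) in doubledBlockers:
--                 blockers[(i, j)] = None
--     return blockers
-- ===== SOURCE B (Python) =====
-- def doubleValues(connections, size):
--     doubled = {(x * 2, y * 2) for row in connections for x, y in row}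
--     cells = [p for p in doubled if 0 <= p[0] < size and 0 <= p[1] < size]
--     cells.sort(key=lambda p: p[0] * size + p[1])
--     return dict.fromkeys(cells)
-- ===== Notes on version B (the rewrite author's own statement) =====
-- stated objective: faster
-- what changed: Instead of scanning all size*size grid cells and testing each against the dict of doubled coordinates, B collects the doubled coordinates once, filters the in-bounds ones and sorts them by row-major key, so the cost depends on the number of blocker points rather than on the grid area.
import Mathlib
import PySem

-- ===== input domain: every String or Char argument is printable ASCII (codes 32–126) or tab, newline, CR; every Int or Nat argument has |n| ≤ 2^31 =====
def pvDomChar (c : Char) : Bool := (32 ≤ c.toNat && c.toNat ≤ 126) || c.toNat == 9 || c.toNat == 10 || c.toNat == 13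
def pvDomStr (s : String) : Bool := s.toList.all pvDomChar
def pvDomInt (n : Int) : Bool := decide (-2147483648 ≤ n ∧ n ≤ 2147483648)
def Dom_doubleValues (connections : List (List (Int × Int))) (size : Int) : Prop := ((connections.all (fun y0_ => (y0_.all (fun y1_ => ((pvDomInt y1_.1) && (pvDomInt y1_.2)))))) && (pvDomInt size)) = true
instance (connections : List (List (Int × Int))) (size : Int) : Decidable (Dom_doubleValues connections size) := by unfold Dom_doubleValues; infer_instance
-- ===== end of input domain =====

-- B replaces A's scan over all size*size grid cells by collecting the doubled points once,
-- filtering the in-bounds ones and sorting them into A's row-major order.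

-- ===== PORT A =====
def doubleValues (connections : List (List (Int × Int))) (size : Int) : List (Int × Int × Option Int) :=
  let doubledBlockers : PySem.Dict (Int × Int) (Option Int) :=
    (PySem.List.pyRange 0 (PySem.List.len connections) 1).foldl (fun d a =>
      let val := PySem.List.pyGetD connections a []
      (PySem.List.pyRange 0 (PySem.List.len val) 1).foldl (fun d b =>
        let t := PySem.List.pyGetD val b (0, 0)
        d.insert (t.1 * 2, t.2 * 2) none) d) PySem.Dict.empty
  let blockers : PySem.Dict (Int × Int) (Option Int) :=
    (PySem.List.pyRange 0 size 1).foldl (fun bl i =>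
      (PySem.List.pyRange 0 size 1).foldl (fun bl j =>
        if doubledBlockers.contains (i, j) then bl.insert (i, j) none else bl) bl)
      PySem.Dict.empty
  blockers.items.map (fun p => (p.1.1, p.1.2, p.2))

-- ===== PORT B =====
def doubleValues_alt (connections : List (List (Int × Int))) (size : Int) : List (Int × Int × Option Int) :=
  let doubled : PySem.Set (Int × Int) :=
    PySem.Set.ofList (connections.flatMap (fun row => row.map (fun q => (q.1 * 2, q.2 * 2))))
  let cells := doubled.filter (fun p => decide (0 ≤ p.1 ∧ p.1 < size ∧ 0 ≤ p.2 ∧ p.2 < size))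
  let sortedCells := PySem.List.sorted cells (fun p => p.1 * size + p.2)
  let blockers : PySem.Dict (Int × Int) (Option Int) :=
    sortedCells.foldl (fun d k => d.insert k none) PySem.Dict.empty
  blockers.items.map (fun p => (p.1.1, p.1.2, p.2))

-- ===== PRECONDITION & SPEC =====
def Spec_doubleValues (connections : List (List (Int × Int))) (size : Int) (out : List (Int × Int × Option Int)) : Prop := out = doubleValues_alt connections size
instance (connections : List (List (Int × Int))) (size : Int) (out : List (Int × Int × Option Int)) : Decidable (Spec_doubleValues connections size out) := by unfold Spec_doubleValues; infer_instance

-- ===== CLAIM (what is proved, stated in full; the proofs are below) =====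
def Claim_equal_doubleValues : Prop := ∀ (connections : List (List (Int × Int))) (size : Int), Dom_doubleValues connections size → Spec_doubleValues connections size (doubleValues connections size)

-- ===== LEMMAS AND PROOFS =====

-- the doubled blocker coordinates, in first-encounter order
def pvDoubledList (connections : List (List (Int × Int))) : List (Int × Int) :=
  connections.flatMap (fun row => row.map (fun q => (q.1 * 2, q.2 * 2)))

-- the grid cells in A's scan order (row-major)
def pvGrid (size : Int) : List (Int × Int) :=
  (PySem.List.pyRange 0 size 1).flatMap (fun i =>
    (PySem.List.pyRange 0 size 1).map (fun j => (i, j)))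

lemma inner_eq (val : List (Int × Int)) (d0 : PySem.Dict (Int × Int) (Option Int)) :
    (PySem.List.pyRange 0 (PySem.List.len val) 1).foldl (fun d b =>
        d.insert ((PySem.List.pyGetD val b (0, 0)).1 * 2, (PySem.List.pyGetD val b (0, 0)).2 * 2) none) d0
      = val.foldl (fun d q => d.insert (q.1 * 2, q.2 * 2) none) d0 :=
  PySem.List.foldl_pyRange_zero_pyGetD val (0, 0) (fun d q => d.insert (q.1 * 2, q.2 * 2) none) d0

lemma outer_eq (c : List (List (Int × Int))) (d0 : PySem.Dict (Int × Int) (Option Int)) :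
    (PySem.List.pyRange 0 (PySem.List.len c) 1).foldl (fun d a =>
        (PySem.List.pyGetD c a []).foldl (fun d q => d.insert (q.1 * 2, q.2 * 2) none) d) d0
      = c.foldl (fun d val => val.foldl (fun d q => d.insert (q.1 * 2, q.2 * 2) none) d) d0 :=
  PySem.List.foldl_pyRange_zero_pyGetD c [] (fun d val => val.foldl (fun d q => d.insert (q.1 * 2, q.2 * 2) none) d) d0

lemma keys_doubled (c : List (List (Int × Int))) :
    (c.foldl (fun d val => val.foldl (fun d q => d.insert (q.1 * 2, q.2 * 2) (none : Option Int)) d)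
        PySem.Dict.empty).keys = PySem.Set.ofList (pvDoubledList c) := by
  rw [← List.foldl_flatMap (f := fun row : List (Int × Int) => row)
        (g := fun (d : PySem.Dict (Int × Int) (Option Int)) (q : Int × Int) => d.insert (q.1 * 2, q.2 * 2) none)]
  rw [PySem.Dict.keys_foldl_insert_key (c.flatMap (fun row => row)) (fun q => (q.1 * 2, q.2 * 2)) (fun _ _ => none)]
  rw [PySem.Dict.keys_empty]
  rw [PySem.Set.ofList_eq_foldl]
  have : List.map (fun q : Int × Int => (q.1 * 2, q.2 * 2)) (c.flatMap (fun row => row)) = pvDoubledList c := by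
    rw [List.map_flatMap, pvDoubledList]
  rw [this]
  rfl

lemma nested_foldl_grid {β : Type} (s : Int) (g : β → Int × Int → β) (init : β) :
    (PySem.List.pyRange 0 s 1).foldl (fun acc i =>
        (PySem.List.pyRange 0 s 1).foldl (fun acc j => g acc (i, j)) acc) init
      = (pvGrid s).foldl g init := by
  rw [pvGrid, List.foldl_flatMap]
  simp [List.foldl_map]

lemma items_fromkeys (l : List (Int × Int)) (h : l.Nodup) :
    (l.foldl (fun d k => d.insert k (none : Option Int)) PySem.Dict.empty).items
      = l.map (fun k => (k, (none : Option Int))) := by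
  have := PySem.Dict.items_foldl_insert_fresh l (fun k => k) (fun _ => (none : Option Int))
      PySem.Dict.empty (by intro a _; simp [PySem.Dict.contains_empty]) (by simpa)
  simpa using this

lemma pairwise_key_pvGrid (size : Int) :
    (pvGrid size).Pairwise (fun a b => a.1 * size + a.2 < b.1 * size + b.2) := by
  rw [pvGrid, List.pairwise_flatMap]
  constructor
  · intro i _
    rw [List.pairwise_map]
    refine (PySem.List.pairwise_lt_pyRange_one 0 size).imp ?_
    intro a b h; dsimp only; omega
  · refine (PySem.List.pairwise_lt_pyRange_one 0 size).imp ?_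
    intro i1 i2 h x hx y hy
    simp only [List.mem_map] at hx hy
    obtain ⟨j1, hj1, rfl⟩ := hx
    obtain ⟨j2, hj2, rfl⟩ := hy
    rw [PySem.List.mem_pyRange_one] at hj1 hj2
    dsimp only
    have h1 : (i1 + 1) * size ≤ i2 * size := by
      apply mul_le_mul_of_nonneg_right (by omega) (by omega)
    nlinarith

lemma nodup_pvGrid (size : Int) : (pvGrid size).Nodup := by
  refine (pairwise_key_pvGrid size).imp ?_
  intro a b h hab
  subst hab
  omega

lemma mem_pvGrid (size : Int) (p : Int × Int) :
    p ∈ pvGrid size ↔ 0 ≤ p.1 ∧ p.1 < size ∧ 0 ≤ p.2 ∧ p.2 < size := by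
  obtain ⟨i, j⟩ := p
  simp only [pvGrid, List.mem_flatMap, List.mem_map, PySem.List.mem_pyRange_one, Prod.mk.injEq]
  constructor
  · rintro ⟨a, ⟨h1, h2⟩, b, ⟨h3, h4⟩, rfl, rfl⟩; exact ⟨h1, h2, h3, h4⟩
  · rintro ⟨h1, h2, h3, h4⟩; exact ⟨i, ⟨h1, h2⟩, j, ⟨h3, h4⟩, rfl, rfl⟩

lemma doubleValues_eq (connections : List (List (Int × Int))) (size : Int) :
    doubleValues connections size
      = ((pvGrid size).filter (fun k => decide (k ∈ PySem.Set.ofList (pvDoubledList connections)))).map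
          (fun k => (k.1, k.2, (none : Option Int))) := by
  simp only [doubleValues]
  simp only [inner_eq, outer_eq]
  have hk := keys_doubled connections
  simp only [PySem.Dict.contains_eq_decide_mem_keys, hk]
  rw [nested_foldl_grid (β := PySem.Dict (Int × Int) (Option Int)) size (fun bl k =>
    if decide (k ∈ PySem.Set.ofList (pvDoubledList connections)) = true then bl.insert k (none : Option Int) else bl)]
  rw [← List.foldl_filter]
  rw [items_fromkeys _ ((nodup_pvGrid size).filter _)]
  rw [List.map_map]
  rfl

lemma doubleValues_alt_eq (connections : List (List (Int × Int))) (size : Int) :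
    doubleValues_alt connections size
      = (PySem.List.sorted
            ((PySem.Set.ofList (pvDoubledList connections)).filter
              (fun p => decide (0 ≤ p.1 ∧ p.1 < size ∧ 0 ≤ p.2 ∧ p.2 < size)))
            (fun p => p.1 * size + p.2)).map
          (fun k => (k.1, k.2, (none : Option Int))) := by
  simp only [doubleValues_alt]
  rw [show (connections.flatMap (fun row => row.map (fun q => (q.1 * 2, q.2 * 2)))) = pvDoubledList connections from rfl]
  rw [items_fromkeys _ ((PySem.List.sorted_perm _ _ _).symm.nodup
    ((PySem.Set.nodup_ofList _).filter _))]
  rw [List.map_map]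
  rfl

lemma sorted_cells_eq_filter_grid (connections : List (List (Int × Int))) (size : Int) :
    PySem.List.sorted
        ((PySem.Set.ofList (pvDoubledList connections)).filter
          (fun p => decide (0 ≤ p.1 ∧ p.1 < size ∧ 0 ≤ p.2 ∧ p.2 < size)))
        (fun p => p.1 * size + p.2)
      = (pvGrid size).filter (fun k => decide (k ∈ PySem.Set.ofList (pvDoubledList connections))) := by
  apply PySem.List.sorted_eq_of_perm_of_pairwise_lt
  · apply (List.perm_ext_iff_of_nodup ((nodup_pvGrid size).filter _)
      ((PySem.Set.nodup_ofList _).filter _)).mpr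
    intro x
    simp only [List.mem_filter, mem_pvGrid, PySem.Set.mem_ofList, decide_eq_true_eq]
    tauto
  · exact (pairwise_key_pvGrid size).filter _

-- ===== VERDICT (by name: the statement is the Claim_ definition above) =====
theorem doubleValues_spec : Claim_equal_doubleValues := by
  intro connections size _
  unfold Spec_doubleValues
  rw [doubleValues_eq, doubleValues_alt_eq, sorted_cells_eq_filter_grid]
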